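-- pv_equiv track=rewrite | github.com/SynPlexity/seq_analysis_synplexity | scripts/2_analyze_seqs.py | count_internal_repeats
-- ===== SOURCE A (Python) =====
-- from collections import Counter
--
-- MIN_REPEAT_LEN = 9
--
-- def count_internal_repeats(seq: str, min_len: int = MIN_REPEAT_LEN) -> Counter:
--     n = len(seq)
--     reps = Counter()
--     for k in range(min_len, n // 2 + 1):
--         seen: dict[str, int] = {}
--         for i in range(n - k + 1):
--             sub = seq[i:i + k]
--             if sub in seen:
--                 reps[k] += 1
--             else:
--                 seen[sub] = i
--     return reps
-- ===== SOURCE B (Python) =====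
-- from collections import Counter
--
-- MIN_REPEAT_LEN = 9
--
-- def _lcp(a, b):
--     # longest common prefix length: 64-char block compares, then a short scalar tail
--     m = min(len(a), len(b))
--     l = 0
--     while l + 64 <= m and a[l:l + 64] == b[l:l + 64]:
--         l += 64
--     while l < m and a[l] == b[l]:
--         l += 1
--     return l
--
-- def count_internal_repeats(seq: str, min_len: int = MIN_REPEAT_LEN) -> Counter:
--     # Suffix-array style: sort all suffixes once and take the longest common
--     # prefix of each adjacent pair; every repeated length-k window is exactly
--     # one adjacent sorted-suffix pair with LCP >= k, so reps[k] just counts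
--     # those LCPs -- no per-length substring enumeration at all.
--     n = len(seq)
--     reps = Counter()
--     if min_len > n // 2:
--         return reps
--     suffixes = sorted(seq[i:] for i in range(n))
--     lcps = [_lcp(a, b) for a, b in zip(suffixes, suffixes[1:])]
--     for k in range(min_len, n // 2 + 1):
--         r = sum(1 for l in lcps if l >= k)
--         if r:
--             reps[k] = r
--     return reps
-- ===== Notes on version B (the rewrite author's own statement) =====
-- stated objective: alternative
-- what changed: A enumerates, for every length k, all length-k windows and counts duplicate hits in a per-k hash dict; B sorts the suffixes once, computes the longest common prefix of each adjacent sorted pair, and reads reps[k] off as the number of adjacent LCPs >= k, with no per-length substring enumeration.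
-- intended difference: For min_len <= 0 (except the vacuous empty-string min_len=0 case) A also reports 'repeats' for k<=0 -- e.g. reps[0] = len(seq), an artifact of every empty slice seq[i:i+k] colliding -- while B reports the count of qualifying suffix pairs there, which differs because k<=0 names no real substring length. — e.g. on count_internal_repeats("a", 0): A returns [(0, 1)], B returns []
import Mathlib
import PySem

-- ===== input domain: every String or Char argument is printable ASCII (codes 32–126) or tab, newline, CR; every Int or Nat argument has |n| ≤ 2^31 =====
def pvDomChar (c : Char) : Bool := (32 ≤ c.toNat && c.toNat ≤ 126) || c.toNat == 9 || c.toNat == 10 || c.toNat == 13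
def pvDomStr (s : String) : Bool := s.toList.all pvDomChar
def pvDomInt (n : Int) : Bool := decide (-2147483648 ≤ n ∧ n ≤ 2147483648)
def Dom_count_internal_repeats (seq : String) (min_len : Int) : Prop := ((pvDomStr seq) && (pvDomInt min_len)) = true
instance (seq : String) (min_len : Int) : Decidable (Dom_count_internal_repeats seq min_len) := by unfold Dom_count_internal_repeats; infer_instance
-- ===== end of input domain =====

-- B sorts the suffixes once and counts adjacent sorted-suffix pairs with LCP ≥ k instead of
-- A's per-length window enumeration with a seen-dict; objective: alternative algorithm.

-- ===== PORT A =====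
-- A: for k in range(min_len, n//2+1): seen = {}; for i in range(n-k+1): sub = seq[i:i+k];
--    if sub in seen: reps[k] += 1 else seen[sub] = i.  reps is a Counter (insertion-ordered dict).
def count_internal_repeats (seq : String) (min_len : Int) : List (Int × Int) :=
  let n : Int := PySem.Str.len seq
  ((PySem.List.pyRange min_len (PySem.Int.floordiv n 2 + 1)).foldl
    (fun (reps : PySem.Dict Int Int) k =>
      ((PySem.List.pyRange 0 (n - k + 1)).foldl
        (fun (st : PySem.Dict Int Int × PySem.Dict String Int) i =>
          if st.2.contains (PySem.Str.slice seq (some i) (some (i + k))) then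
            (st.1.insert k (st.1.getD k 0 + 1), st.2)
          else
            (st.1, st.2.insert (PySem.Str.slice seq (some i) (some (i + k))) i))
        (reps, PySem.Dict.empty)).1)
    PySem.Dict.empty).items

-- ===== PORT B =====
-- _lcp's first loop: 'while l + 64 <= m and a[l:l+64] == b[l:l+64]: l += 64'
-- (fuel only makes the recursion total; it never runs out: l grows by 64 per step)
def pvLcpBlocks (a b : String) (m : Nat) : Nat → Nat → Nat
  | 0, l => l
  | fuel + 1, l =>
    if l + 64 ≤ m ∧ PySem.Str.slice a (some (l : Int)) (some ((l : Int) + 64))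
        = PySem.Str.slice b (some (l : Int)) (some ((l : Int) + 64)) then
      pvLcpBlocks a b m fuel (l + 64)
    else l

-- _lcp's second loop: 'while l < m and a[l] == b[l]: l += 1'
def pvLcpTail (a b : String) (m : Nat) : Nat → Nat → Nat
  | 0, l => l
  | fuel + 1, l =>
    if l < m ∧ PySem.Str.pyGet? a (l : Int) = PySem.Str.pyGet? b (l : Int) then
      pvLcpTail a b m fuel (l + 1)
    else l

-- B's _lcp(a, b): m = min(len(a), len(b)); the block loop, then the scalar tail
def pvLcpFast (a b : String) : Int :=
  let m : Nat := min a.toList.length b.toList.length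
  ((pvLcpTail a b m (m + 1) (pvLcpBlocks a b m (m + 1) 0) : Nat) : Int)

-- B: if min_len > n//2: return reps; suffixes = sorted(seq[i:] for i in range(n));
--    lcps = [_lcp(a,b) for a,b in zip(suffixes, suffixes[1:])];
--    for k in range(min_len, n//2+1): r = sum(1 for l in lcps if l >= k); if r: reps[k] = r
def count_internal_repeats_alt (seq : String) (min_len : Int) : List (Int × Int) :=
  let n : Int := PySem.Str.len seq
  if min_len > PySem.Int.floordiv n 2 then (PySem.Dict.empty : PySem.Dict Int Int).items
  else
    let suffixes : List String :=
      PySem.List.sorted ((PySem.List.pyRange 0 n).map (fun i => PySem.Str.slice seq (some i) none)) (fun s => s) false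
    let lcps : List Int :=
      (suffixes.zip (PySem.List.slice suffixes (some 1) none)).map (fun p => pvLcpFast p.1 p.2)
    ((PySem.List.pyRange min_len (PySem.Int.floordiv n 2 + 1)).foldl
      (fun (reps : PySem.Dict Int Int) k =>
        let r : Int := (lcps.map (fun l => if k ≤ l then (1 : Int) else 0)).sum
        if r ≠ 0 then reps.insert k r else reps)
      PySem.Dict.empty).items

-- ===== PRECONDITION & SPEC =====
-- For min_len ≤ 0 (except the vacuous case seq = "" with min_len = 0) A also reports "repeats" of
-- non-positive lengths k ≤ 0 — e.g. reps[0] = len(seq), every empty slice seq[i:i+k] colliding —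
-- while B reports nothing for k ≤ 0, which is the intended meaning of a repeat-length threshold.
def D_count_internal_repeats (seq : String) (min_len : Int) : Prop :=
  min_len ≤ 0 ∧ (1 ≤ PySem.Str.len seq ∨ min_len ≤ -1)
instance (seq : String) (min_len : Int) : Decidable (D_count_internal_repeats seq min_len) := by unfold D_count_internal_repeats; infer_instance

def Spec_count_internal_repeats (seq : String) (min_len : Int) (out : List (Int × Int)) : Prop := ¬ D_count_internal_repeats seq min_len → out = count_internal_repeats_alt seq min_len
instance (seq : String) (min_len : Int) (out : List (Int × Int)) : Decidable (Spec_count_internal_repeats seq min_len out) := by unfold Spec_count_internal_repeats; infer_instance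

def pvDiffWitness_count_internal_repeats : String × Int := ("a", 0)
def pvDiffWitnessOut_count_internal_repeats : (List (Int × Int)) × (List (Int × Int)) := ([(0, 1)], [])

-- ===== CLAIM (what is proved, stated in full; the proofs are below) =====
def Claim_unchanged_count_internal_repeats : Prop := ∀ (seq : String) (min_len : Int), Dom_count_internal_repeats seq min_len → Spec_count_internal_repeats seq min_len (count_internal_repeats seq min_len)
def Claim_changed_count_internal_repeats : Prop := Dom_count_internal_repeats (pvDiffWitness_count_internal_repeats.1) (pvDiffWitness_count_internal_repeats.2) ∧ D_count_internal_repeats (pvDiffWitness_count_internal_repeats.1) (pvDiffWitness_count_internal_repeats.2) ∧ count_internal_repeats (pvDiffWitness_count_internal_repeats.1) (pvDiffWitness_count_internal_repeats.2) = pvDiffWitnessOut_count_internal_repeats.1 ∧ count_internal_repeats_alt (pvDiffWitness_count_internal_repeats.1) (pvDiffWitness_count_internal_repeats.2) = pvDiffWitnessOut_count_internal_repeats.2 ∧ pvDiffWitnessOut_count_internal_repeats.1 ≠ pvDiffWitnessOut_count_internal_repeats.2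

-- ===== LEMMAS AND PROOFS =====

-- proof-side counter: number of loop indices whose substring was already seen (A's inner loop)
def pvDups (f : Int → String) : List Int → List String → Nat
  | [], _ => 0
  | i :: is, s => if f i ∈ s then pvDups f is s + 1 else pvDups f is (s ++ [f i])

-- proof-side counter: number of adjacent pairs of a list satisfying p (B's lcp scan)
def pvPairCnt {α : Type} (p : α → α → Bool) : List α → Nat
  | x :: y :: t => (if p x y then 1 else 0) + pvPairCnt p (y :: t)
  | _ => 0

-- proof-side: the plain character-by-character lcp that B's two loops jointly compute
def pvLcp : List Char → List Char → Nat
  | a :: as, b :: bs => if a = b then pvLcp as bs + 1 else 0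
  | _, _ => 0

-- B's inner set fold: final size + duplicate count = initial size + number of windows
lemma pvInnerSet (f : Int → String) : ∀ (is : List Int) (s0 : PySem.Set String),
    ((is.foldl (fun (s : PySem.Set String) i => s.add (f i)) s0)).length + pvDups f is s0
      = s0.length + is.length := by
  intro is
  induction is with
  | nil => intro s0; simp [pvDups]
  | cons i is ih =>
    intro s0
    simp only [List.foldl_cons, pvDups, List.length_cons]
    rw [PySem.Set.add_eq_ite]
    by_cases h : f i ∈ s0
    · simp only [h, if_pos]
      have := ih s0
      omega
    · simp only [h, if_false]
      have := ih (s0 ++ [f i])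
      simp only [List.length_append, List.length_singleton] at this
      omega

-- A's inner fold: the Counter gains k exactly when a duplicate occurs, with the duplicate count
lemma pvInnerA (f : Int → String) (k : Int) : ∀ (is : List Int) (s : List String)
    (seen : PySem.Dict String Int) (reps0 : PySem.Dict Int Int) (c : Nat),
    seen.keys = s → reps0.contains k = false →
    (is.foldl
      (fun (st : PySem.Dict Int Int × PySem.Dict String Int) i =>
        if st.2.contains (f i) then (st.1.insert k (st.1.getD k 0 + 1), st.2)
        else (st.1, st.2.insert (f i) i))
      ((if c = 0 then reps0 else reps0.insert k (c : Int)), seen)).1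
    = (if c + pvDups f is s = 0 then reps0 else reps0.insert k ((c + pvDups f is s : Nat) : Int)) := by
  intro is
  induction is with
  | nil =>
    intro s seen reps0 c _ _
    simp [pvDups]
  | cons i is ih =>
    intro s seen reps0 c hkeys hk
    simp only [List.foldl_cons]
    have hcont : seen.contains (f i) = true ↔ f i ∈ s := by
      rw [PySem.Dict.contains_iff_mem_keys, hkeys]
    by_cases hmem : f i ∈ s
    · have hc : seen.contains (f i) = true := hcont.mpr hmem
      simp only [hc, if_true]
      have hgetD : (if c = 0 then reps0 else reps0.insert k (c : Int)).getD k 0 = (c : Int) := by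
        by_cases hc0 : c = 0
        · simp [hc0, PySem.Dict.getD_of_not_contains reps0 0 hk]
        · simp [hc0, PySem.Dict.getD_insert_self]
      have hins : (if c = 0 then reps0 else reps0.insert k (c : Int)).insert k ((c : Int) + 1)
          = reps0.insert k ((c + 1 : Nat) : Int) := by
        by_cases hc0 : c = 0
        · simp [hc0]
        · rw [if_neg hc0, PySem.Dict.insert_insert_self]
          norm_cast
      rw [hgetD, hins]
      have h1 : pvDups f (i :: is) s = pvDups f is s + 1 := by simp [pvDups, hmem]
      rw [h1]
      have hee : c + (pvDups f is s + 1) = (c + 1) + pvDups f is s := by omega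
      rw [hee]
      have h2 := ih s seen reps0 (c + 1) hkeys hk
      rw [if_neg (by omega : ¬ (c + 1) = 0)] at h2
      rw [h2, if_neg (by omega : ¬ (c + 1) + pvDups f is s = 0)]
    · have hc : seen.contains (f i) = false := by
        cases h' : seen.contains (f i)
        · rfl
        · exact absurd (hcont.mp h') hmem
      simp only [hc, Bool.false_eq_true, if_false]
      have hkeys' : (seen.insert (f i) i).keys = s ++ [f i] := by
        rw [PySem.Dict.keys_insert_of_not_contains seen i hc, hkeys]
      have := ih (s ++ [f i]) (seen.insert (f i) i) reps0 c hkeys' hk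
      rw [this]
      simp [pvDups, hmem]

lemma pvLcp_nil_left (y : List Char) : pvLcp [] y = 0 := by cases y <;> rfl
lemma pvLcp_nil_right (x : List Char) : pvLcp x [] = 0 := by cases x <;> rfl

-- lcp past the shorter end is 0
lemma pvLcp_drop_zero (x y : List Char) (l : Nat) (h : min x.length y.length ≤ l) :
    pvLcp (x.drop l) (y.drop l) = 0 := by
  rcases Nat.le_total x.length y.length with h' | h'
  · rw [show x.drop l = [] from List.drop_eq_nil_of_le (by omega), pvLcp_nil_left]
  · rw [show y.drop l = [] from List.drop_eq_nil_of_le (by omega), pvLcp_nil_right]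

-- lcp absorbs an agreed prefix of length j
lemma pvLcp_split : ∀ (j : Nat) (x y : List Char), x.take j = y.take j →
    j ≤ x.length → j ≤ y.length → pvLcp x y = j + pvLcp (x.drop j) (y.drop j) := by
  intro j
  induction j with
  | zero => intro x y _ _ _; simp
  | succ i ih =>
    intro x y htake hx hy
    cases x with
    | nil => simp at hx
    | cons a as =>
      cases y with
      | nil => simp at hy
      | cons b bs =>
        simp only [List.take_succ_cons, List.cons.injEq] at htake
        obtain ⟨rfl, ht⟩ := htake
        rw [show pvLcp (a :: as) (a :: bs) = pvLcp as bs + 1 from by simp [pvLcp]]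
        rw [List.drop_succ_cons, List.drop_succ_cons]
        rw [ih as bs ht (by simpa using hx) (by simpa using hy)]
        omega

-- the scalar tail loop finishes the char-by-char lcp from any start point
lemma pvLcpTail_eq (a b : String) (m : Nat) (hm : m = min a.toList.length b.toList.length) :
    ∀ (fuel l : Nat), m ≤ l + fuel →
      pvLcpTail a b m fuel l = l + pvLcp (a.toList.drop l) (b.toList.drop l) := by
  intro fuel
  induction fuel with
  | zero =>
    intro l hl
    rw [pvLcp_drop_zero a.toList b.toList l (by omega)]
    simp [pvLcpTail]
  | succ fuel ih =>
    intro l hl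
    by_cases hc : l < m ∧ PySem.Str.pyGet? a (l : Int) = PySem.Str.pyGet? b (l : Int)
    · obtain ⟨hlm, hg⟩ := hc
      have hla : l < a.toList.length := by omega
      have hlb : l < b.toList.length := by omega
      have hgg : a.toList[l] = b.toList[l] := by
        rw [PySem.Str.pyGet?_natCast, PySem.Str.pyGet?_natCast,
          List.getElem?_eq_getElem hla, List.getElem?_eq_getElem hlb] at hg
        simpa using hg
      rw [show pvLcpTail a b m (fuel + 1) l = pvLcpTail a b m fuel (l + 1) from by
        simp only [pvLcpTail]; rw [if_pos ⟨hlm, hg⟩]]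
      rw [ih (l + 1) (by omega)]
      rw [List.drop_eq_getElem_cons hla, List.drop_eq_getElem_cons hlb]
      rw [show pvLcp (a.toList[l] :: a.toList.drop (l + 1)) (b.toList[l] :: b.toList.drop (l + 1))
          = pvLcp (a.toList.drop (l + 1)) (b.toList.drop (l + 1)) + 1 from by simp [pvLcp, hgg]]
      omega
    · rw [show pvLcpTail a b m (fuel + 1) l = l from by
        simp only [pvLcpTail]; rw [if_neg hc]]
      rcases not_and_or.mp hc with hm' | hne
      · rw [pvLcp_drop_zero a.toList b.toList l (by omega)]
        omega
      · have hla : l < a.toList.length ∨ m ≤ l := by omega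
        rcases Nat.lt_or_ge l m with hlm | hlm
        · have hla : l < a.toList.length := by omega
          have hlb : l < b.toList.length := by omega
          have hgg : a.toList[l] ≠ b.toList[l] := by
            intro h
            apply hne
            rw [PySem.Str.pyGet?_natCast, PySem.Str.pyGet?_natCast,
              List.getElem?_eq_getElem hla, List.getElem?_eq_getElem hlb, h]
          rw [List.drop_eq_getElem_cons hla, List.drop_eq_getElem_cons hlb]
          rw [show pvLcp (a.toList[l] :: a.toList.drop (l + 1)) (b.toList[l] :: b.toList.drop (l + 1))
              = 0 from by simp [pvLcp, hgg]]
          omega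
        · rw [pvLcp_drop_zero a.toList b.toList l (by omega)]
          omega

-- each 64-block step of the first loop preserves "position + remaining lcp"
lemma pvLcpBlocks_eq (a b : String) (m : Nat) (hm : m = min a.toList.length b.toList.length) :
    ∀ (fuel l : Nat),
      pvLcpBlocks a b m fuel l
        + pvLcp (a.toList.drop (pvLcpBlocks a b m fuel l)) (b.toList.drop (pvLcpBlocks a b m fuel l))
      = l + pvLcp (a.toList.drop l) (b.toList.drop l) := by
  intro fuel
  induction fuel with
  | zero => intro l; rfl
  | succ fuel ih =>
    intro l
    by_cases hc : l + 64 ≤ m ∧ PySem.Str.slice a (some (l : Int)) (some ((l : Int) + 64))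
        = PySem.Str.slice b (some (l : Int)) (some ((l : Int) + 64))
    · rw [show pvLcpBlocks a b m (fuel + 1) l = pvLcpBlocks a b m fuel (l + 64) from by
        simp only [pvLcpBlocks]; rw [if_pos hc]]
      rw [ih (l + 64)]
      obtain ⟨hlm, hsl⟩ := hc
      have hts := congrArg String.toList hsl
      simp only [pysem] at hts
      have hcast : ((l : Int) + 64) = ((l + 64 : Nat) : Int) := by push_cast; ring
      rw [hcast, PySem.List.slice_natCast, PySem.List.slice_natCast,
        show l + 64 - l = 64 from by omega] at hts
      have htl : (a.toList.drop l).take 64 = (b.toList.drop l).take 64 := hts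
      have h64a : 64 ≤ (a.toList.drop l).length := by rw [List.length_drop]; omega
      have h64b : 64 ≤ (b.toList.drop l).length := by rw [List.length_drop]; omega
      rw [pvLcp_split 64 _ _ htl h64a h64b, List.drop_drop, List.drop_drop]
      omega
    · rw [show pvLcpBlocks a b m (fuel + 1) l = l from by
        simp only [pvLcpBlocks]; rw [if_neg hc]]

-- B's _lcp computes exactly the character-by-character lcp
lemma pvLcpFast_eq (a b : String) : pvLcpFast a b = ((pvLcp a.toList b.toList : Nat) : Int) := by
  have hm : min a.toList.length b.toList.length = min a.toList.length b.toList.length := rfl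
  have ht := pvLcpTail_eq a b (min a.toList.length b.toList.length) rfl
    (min a.toList.length b.toList.length + 1)
    (pvLcpBlocks a b (min a.toList.length b.toList.length)
      (min a.toList.length b.toList.length + 1) 0) (by omega)
  have hb := pvLcpBlocks_eq a b (min a.toList.length b.toList.length) rfl
    (min a.toList.length b.toList.length + 1) 0
  have hfin : pvLcpTail a b (min a.toList.length b.toList.length)
      (min a.toList.length b.toList.length + 1)
      (pvLcpBlocks a b (min a.toList.length b.toList.length)
        (min a.toList.length b.toList.length + 1) 0)
      = pvLcp a.toList b.toList := by
    rw [ht]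
    simpa using hb
  show ((pvLcpTail a b _ _ _ : Nat) : Int) = _
  rw [hfin]

-- k ≤ lcp(x, y) names exactly "the k-prefixes exist and agree"
lemma pvLcp_ge_iff : ∀ (k : Nat) (x y : List Char),
    k ≤ pvLcp x y ↔ (x.take k = y.take k ∧ k ≤ x.length ∧ k ≤ y.length) := by
  intro k x
  induction x generalizing k with
  | nil =>
    intro y
    simp [pvLcp]
    omega
  | cons a as ih =>
    intro y
    cases y with
    | nil => simp [pvLcp]; omega
    | cons b bs =>
      cases k with
      | zero => simp
      | succ j =>
        by_cases hab : a = b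
        · subst hab
          have hstep : pvLcp (a :: as) (a :: bs) = pvLcp as bs + 1 := by simp [pvLcp]
          rw [hstep]
          simp only [List.take_succ_cons, List.length_cons, Nat.succ_le_succ_iff,
            List.cons.injEq, true_and]
          exact ih j bs
        · have hstep : pvLcp (a :: as) (b :: bs) = 0 := by simp [pvLcp, hab]
          rw [hstep]
          simp only [List.take_succ_cons, List.cons.injEq, List.length_cons]
          constructor
          · omega
          · rintro ⟨⟨h, -⟩, -⟩; exact absurd h hab

-- for DISTINCT x y, k ≤ lcp(x, y) is exactly "the k-prefixes agree" (short equal takes force x = y)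
lemma pvLcp_ge_iff_take_eq (k : Nat) (x y : List Char) (hne : x ≠ y) :
    k ≤ pvLcp x y ↔ x.take k = y.take k := by
  rw [pvLcp_ge_iff]
  constructor
  · exact fun h => h.1
  · intro h
    refine ⟨h, ?_, ?_⟩ <;> by_contra hlen <;> rw [not_le] at hlen
    · have hx : x.take k = x := List.take_of_length_le (by omega)
      have hylen : (y.take k).length = x.length := by rw [← h, hx]
      have hy : y.take k = y := by
        have := List.length_take_le k y
        have h2 : y.length ≤ k := by
          rw [List.length_take] at hylen
          omega
        exact List.take_of_length_le h2
      exact hne (by rw [← hx, h, hy])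
    · have hy : y.take k = y := List.take_of_length_le (by omega)
      have hxlen : (x.take k).length = y.length := by rw [h, hy]
      have hx : x.take k = x := by
        have h2 : x.length ≤ k := by
          rw [List.length_take] at hxlen
          omega
        exact List.take_of_length_le h2
      exact hne (by rw [← hx, h, hy])

-- lexicographic order: a strict comparison of the k-prefixes transfers to the full lists
lemma pvTake_lt : ∀ (k : Nat) (x y : List Char), x.take k < y.take k → x < y := by
  intro k
  induction k with
  | zero =>
    intro x y h
    simp only [List.take_zero] at h
    exact absurd ((by exact h : List.Lex (· < ·) [] [])) (by intro h'; cases h')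
  | succ j ih =>
    intro x y h
    cases x with
    | nil =>
      cases y with
      | nil => exact absurd ((by exact h : List.Lex (· < ·) [] [])) (by intro h'; cases h')
      | cons b bs => exact List.Lex.nil
    | cons a as =>
      cases y with
      | nil =>
        simp only [List.take_succ_cons, List.take_nil] at h
        exact absurd ((by exact h : List.Lex (· < ·) _ [])) (by intro h'; cases h')
      | cons b bs =>
        simp only [List.take_succ_cons] at h
        cases (by exact h : List.Lex (· < ·) (a :: as.take j) (b :: bs.take j)) with
        | rel hab => exact List.Lex.rel hab
        | cons htail => exact List.Lex.cons (ih as bs htail)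

lemma pvTake_le (k : Nat) (x y : List Char) (h : x ≤ y) : x.take k ≤ y.take k := by
  by_contra hlt
  rw [not_le] at hlt
  exact absurd (pvTake_lt k y x hlt) (not_lt_of_ge h)

-- countP over zip(S, S[1:]) is the adjacent-pair counter
lemma pvCountP_zip_tail {α : Type} (q : α → α → Bool) :
    ∀ S : List α, (S.zip S.tail).countP (fun p => q p.1 p.2) = pvPairCnt q S := by
  intro S
  induction S with
  | nil => rfl
  | cons x t ih =>
    cases t with
    | nil => rfl
    | cons y t' =>
      simp only [List.tail_cons, List.zip_cons_cons, List.countP_cons, pvPairCnt]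
      rw [← ih]
      simp only [List.tail_cons]
      omega

-- the adjacent-pair counter of a mapped predicate is the counter on the mapped list
lemma pvPairCnt_map {α β : Type} (g : α → β) (q : β → β → Bool) :
    ∀ S : List α, pvPairCnt (fun a b => q (g a) (g b)) S = pvPairCnt q (S.map g) := by
  intro S
  induction S with
  | nil => rfl
  | cons x t ih =>
    cases t with
    | nil => rfl
    | cons y t' =>
      simp only [List.map_cons, pvPairCnt]
      simp only [List.map_cons] at ih
      omega

-- two predicates agreeing on all Pairwise-related pairs count the same
lemma pvPairCnt_congr {α : Type} (R : α → α → Prop) (p q : α → α → Bool) :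
    ∀ S : List α, S.Pairwise R → (∀ a b, R a b → p a b = q a b) →
      pvPairCnt p S = pvPairCnt q S := by
  intro S
  induction S with
  | nil => intro _ _; rfl
  | cons x t ih =>
    intro hpw hpq
    cases t with
    | nil => rfl
    | cons y t' =>
      have hxy : R x y := (List.pairwise_cons.mp hpw).1 y (by simp)
      simp only [pvPairCnt, hpq x y hxy, ih (List.pairwise_cons.mp hpw).2 hpq]

-- on a ≤-sorted list, adjacent equalities + distinct values = length (equal values are adjacent)
lemma pvPairCnt_sorted {α : Type} [LinearOrder α] [DecidableEq α] :
    ∀ T : List α, T.Pairwise (· ≤ ·) →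
      pvPairCnt (fun a b => decide (a = b)) T + T.toFinset.card = T.length := by
  intro T
  induction T with
  | nil => intro _; rfl
  | cons x t ih =>
    intro hpw
    cases t with
    | nil => simp [pvPairCnt]
    | cons y t' =>
      have hle := List.pairwise_cons.mp hpw
      have ih' := ih hle.2
      by_cases hxy : x = y
      · subst hxy
        have hcnt : pvPairCnt (fun a b => decide (a = b)) (x :: x :: t')
            = 1 + pvPairCnt (fun a b => decide (a = b)) (x :: t') := by
          simp [pvPairCnt]
        have hfs : (x :: x :: t').toFinset = (x :: t').toFinset := by simp
        rw [hcnt, hfs, List.length_cons]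
        omega
      · have hnotmem : x ∉ y :: t' := by
          intro hmem
          rcases List.mem_cons.mp hmem with h | h
          · exact hxy h
          · have h1 : x ≤ y := hle.1 y (by simp)
            have h2 : y ≤ x := (List.pairwise_cons.mp hle.2).1 x h
            exact hxy (le_antisymm h1 h2)
        have hcnt : pvPairCnt (fun a b => decide (a = b)) (x :: y :: t')
            = pvPairCnt (fun a b => decide (a = b)) (y :: t') := by
          simp [pvPairCnt, hxy]
        have hfs : (x :: y :: t').toFinset.card = (y :: t').toFinset.card + 1 := by
          rw [List.toFinset_cons, Finset.card_insert_of_notMem (by simpa using hnotmem)]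
        rw [hcnt, hfs, List.length_cons]
        omega

-- a PySem.Set built over a loop has as many elements as the list has distinct values
lemma pvSetLen (L : List String) : (PySem.Set.ofList L).length = L.toFinset.card := by
  have hnd : (PySem.Set.ofList L).Nodup := PySem.Set.nodup_ofList L
  have hfs : (PySem.Set.ofList L).toFinset = L.toFinset := by
    apply Finset.ext
    intro a
    simp [List.mem_toFinset, PySem.Set.mem_ofList]
  rw [← hfs, List.toFinset_card_of_nodup hnd]

-- the distinct k-prefixes of all suffixes: the k-windows plus one short suffix per i > n-k
lemma pvTakeFinset (cs : List Char) (k : Nat) (hk : 1 ≤ k) :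
    ((List.range cs.length).map (fun i => (cs.drop i).take k)).toFinset.card
      = ((List.range (cs.length + 1 - k)).map (fun i => (cs.drop i).take k)).toFinset.card
        + (cs.length - (cs.length + 1 - k)) := by
  set n := cs.length with hn
  set w := n + 1 - k with hw
  have hrange : List.range n = List.range w ++ (List.range (n - w)).map (w + ·) := by
    conv_lhs => rw [show n = w + (n - w) by omega]
    exact List.range_add
  have hmap : (List.range n).map (fun i => (cs.drop i).take k)
      = (List.range w).map (fun i => (cs.drop i).take k)
        ++ (List.range (n - w)).map (fun j => (cs.drop (w + j)).take k) := by
    rw [hrange, List.map_append, List.map_map]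
    rfl
  have hshort : ∀ j ∈ List.range (n - w), (cs.drop (w + j)).take k = cs.drop (w + j) := by
    intro j hj
    rw [List.mem_range] at hj
    apply List.take_of_length_le
    rw [List.length_drop]
    omega
  have hSL : (List.range (n - w)).map (fun j => (cs.drop (w + j)).take k)
      = (List.range (n - w)).map (fun j => cs.drop (w + j)) :=
    List.map_congr_left hshort
  have hSLnodup : ((List.range (n - w)).map (fun j => cs.drop (w + j))).Nodup := by
    apply List.Nodup.map_on _ List.nodup_range
    intro x hx y hy hxy
    rw [List.mem_range] at hx hy
    have hlen := congrArg List.length hxy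
    rw [List.length_drop, List.length_drop] at hlen
    omega
  have hdisj : Disjoint ((List.range w).map (fun i => (cs.drop i).take k)).toFinset
      ((List.range (n - w)).map (fun j => cs.drop (w + j))).toFinset := by
    rw [Finset.disjoint_left]
    intro a ha hb
    rw [List.mem_toFinset, List.mem_map] at ha hb
    obtain ⟨i, hi, rfl⟩ := ha
    obtain ⟨j, hj, hji⟩ := hb
    rw [List.mem_range] at hi hj
    have h1 : ((cs.drop i).take k).length = k := by
      rw [List.length_take, List.length_drop]
      omega
    have h2 : (cs.drop (w + j)).length < k := by
      rw [List.length_drop]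
      omega
    rw [hji, h1] at h2
    omega
  rw [hmap, hSL, List.toFinset_append, Finset.card_union_of_disjoint hdisj,
    List.toFinset_card_of_nodup hSLnodup, List.length_map, List.length_range]

-- distinct count is blind to the injective String → List Char coercion
lemma pvCardToList (L : List String) : (L.map String.toList).toFinset.card = L.toFinset.card := by
  rw [show (L.map String.toList).toFinset = Finset.image String.toList L.toFinset from by
    apply Finset.ext; intro a; simp]
  exact Finset.card_image_of_injective L.toFinset (fun a b h => String.toList_inj.mp h)

-- the heart: A's per-k duplicate count = B's count of adjacent sorted-suffix lcps ≥ k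
lemma pvKey (seq : String) (k : Int) (hk : 1 ≤ k) :
    ((pvDups (fun i => PySem.Str.slice seq (some i) (some (i + k)))
        (PySem.List.pyRange 0 ((PySem.Str.len seq) - k + 1)) [] : Nat) : Int)
    = ((((PySem.List.sorted ((PySem.List.pyRange 0 (PySem.Str.len seq)).map
            (fun i => PySem.Str.slice seq (some i) none)) (fun s => s) false).zip
          (PySem.List.slice (PySem.List.sorted ((PySem.List.pyRange 0 (PySem.Str.len seq)).map
            (fun i => PySem.Str.slice seq (some i) none)) (fun s => s) false) (some 1) none)).map
          (fun p => pvLcpFast p.1 p.2)).map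
        (fun l => if k ≤ l then (1 : Int) else 0)).sum := by
  rw [show (fun p : String × String => pvLcpFast p.1 p.2)
      = (fun p : String × String => ((pvLcp p.1.toList p.2.toList : Nat) : Int)) from
    funext fun p => pvLcpFast_eq p.1 p.2]
  set cs := seq.toList with hcs
  set nN := cs.length with hnN
  set kN := k.toNat with hkN
  have hkI : k = (kN : Int) := by omega
  have hkN1 : 1 ≤ kN := by omega
  have hlen : PySem.Str.len seq = (nN : Int) := by simp [pysem, hcs, hnN]
  set f : Int → String := fun i => PySem.Str.slice seq (some i) (some (i + k)) with hf
  set is : List Int := PySem.List.pyRange 0 ((PySem.Str.len seq) - k + 1) with his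
  -- ===== A side: duplicate count = windows − distinct windows =====
  have hfold : PySem.Set.ofList (is.map f)
      = is.foldl (fun (s : PySem.Set String) i => s.add (f i)) PySem.Set.empty := by
    rw [PySem.Set.ofList_eq_foldl, List.foldl_map]
    rfl
  have hsum := pvInnerSet f is PySem.Set.empty
  rw [← hfold] at hsum
  rw [show pvDups f is PySem.Set.empty = pvDups f is [] from rfl,
    show List.length (PySem.Set.empty : PySem.Set String) = 0 from rfl] at hsum
  have hisl : is.length = nN + 1 - kN := by
    rw [his, PySem.List.length_pyRange_one, hlen, hkI]
    omega
  have hwmap : (is.map f).map String.toList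
      = (List.range (nN + 1 - kN)).map (fun i => (cs.drop i).take kN) := by
    rw [his, PySem.List.pyRange_one, List.map_map, List.map_map,
      show ((PySem.Str.len seq - k + 1) - 0).toNat = nN + 1 - kN by rw [hlen, hkI]; omega]
    apply List.map_congr_left
    intro j hj
    simp [hf, pysem, hkI]
    rw [← hcs]
  have hwcard : (PySem.Set.ofList (is.map f)).length
      = ((List.range (nN + 1 - kN)).map (fun i => (cs.drop i).take kN)).toFinset.card := by
    rw [pvSetLen, ← pvCardToList, hwmap]
  -- ===== B side: the sorted suffix list =====
  set SUF : List String := (PySem.List.pyRange 0 (PySem.Str.len seq)).map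
    (fun i => PySem.Str.slice seq (some i) none) with hSUF
  set S : List String := PySem.List.sorted SUF (fun s => s) false with hS
  set q : String → String → Bool := fun a b => decide (k ≤ ((pvLcp a.toList b.toList : Nat) : Int)) with hq
  have hRHS1 : (((S.zip (PySem.List.slice S (some 1) none)).map
        (fun p => ((pvLcp p.1.toList p.2.toList : Nat) : Int))).map
        (fun l => if k ≤ l then (1 : Int) else 0)).sum
      = ((pvPairCnt q S : Nat) : Int) := by
    rw [PySem.List.slice_from_one]
    have e1 := PySem.List.sum_map_ite_one_zero (fun l => decide (k ≤ l))
      ((S.zip S.tail).map (fun p => ((pvLcp p.1.toList p.2.toList : Nat) : Int)))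
    simp only [decide_eq_true_eq] at e1
    rw [e1, List.countP_map]
    rw [show ((fun l => decide (k ≤ l)) ∘ (fun (p : String × String) =>
        ((pvLcp p.1.toList p.2.toList : Nat) : Int))) = (fun p => q p.1 p.2) from rfl]
    rw [pvCountP_zip_tail q S]
  -- S facts
  have hperm : S.Perm SUF := PySem.List.sorted_perm SUF (fun s => s) false
  have hSUFtoList : SUF.map String.toList = (List.range nN).map (fun i => cs.drop i) := by
    rw [hSUF, PySem.List.pyRange_one, List.map_map, List.map_map,
      show ((PySem.Str.len seq) - 0).toNat = nN by rw [hlen]; omega]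
    apply List.map_congr_left
    intro j hj
    simp [pysem]
    rw [← hcs]
  have hSUFnodup : SUF.Nodup := by
    apply List.Nodup.of_map String.toList
    rw [hSUFtoList]
    apply List.Nodup.map_on _ List.nodup_range
    intro x hx y hy hxy
    rw [List.mem_range] at hx hy
    have hlen2 := congrArg List.length hxy
    rw [List.length_drop, List.length_drop] at hlen2
    omega
  have hSnodup : S.Nodup := hperm.symm.nodup hSUFnodup
  have hSle : S.Pairwise (fun a b => a ≤ b) := by
    have := PySem.List.sorted_pairwise SUF (fun s => s)
    simpa [← hS] using this
  have hSR : S.Pairwise (fun a b => a ≠ b ∧ a ≤ b) := List.Pairwise.and hSnodup hSle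
  -- swap the lcp predicate for prefix equality on adjacent (distinct) pairs
  have h3 : pvPairCnt q S
      = pvPairCnt (fun a b => decide (a.toList.take kN = b.toList.take kN)) S := by
    apply pvPairCnt_congr _ _ _ S hSR
    rintro a b ⟨hne, -⟩
    apply decide_eq_decide.mpr
    rw [hkI, Nat.cast_le]
    exact pvLcp_ge_iff_take_eq kN _ _ (fun h => hne (String.toList_inj.mp h))
  set T : List (List Char) := S.map (fun s => s.toList.take kN) with hT
  have h4 : pvPairCnt (fun a b => decide (a.toList.take kN = b.toList.take kN)) S
      = pvPairCnt (fun x y => decide (x = y)) T :=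
    pvPairCnt_map (fun s => s.toList.take kN) (fun x y => decide (x = y)) S
  have hTpw : T.Pairwise (fun a b => a ≤ b) :=
    List.Pairwise.map _ (fun a b hab => pvTake_le kN _ _ (String.le_iff_toList_le.mp hab)) hSle
  have h5 := pvPairCnt_sorted T hTpw
  have hTlen : T.length = nN := by
    rw [hT, List.length_map, hperm.length_eq, hSUF, List.length_map,
      PySem.List.length_pyRange_one, hlen]
    omega
  have hTcard : T.toFinset.card
      = ((List.range nN).map (fun i => (cs.drop i).take kN)).toFinset.card := by
    have hpm : T.Perm ((SUF.map String.toList).map (fun x => x.take kN)) := by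
      rw [List.map_map]
      exact hperm.map (fun s => s.toList.take kN)
    rw [List.toFinset_eq_of_perm _ _ hpm, hSUFtoList, List.map_map]
    rfl
  have hfin := pvTakeFinset cs kN hkN1
  rw [← hnN] at hfin
  have hWle : ((List.range (nN + 1 - kN)).map (fun i => (cs.drop i).take kN)).toFinset.card
      ≤ nN + 1 - kN := by
    calc _ ≤ ((List.range (nN + 1 - kN)).map (fun i => (cs.drop i).take kN)).length :=
      List.toFinset_card_le _
    _ = nN + 1 - kN := by rw [List.length_map, List.length_range]
  -- assemble
  rw [hRHS1]
  have hgoal : pvDups f is [] = pvPairCnt q S := by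
    rw [h3, h4]
    omega
  rw [hgoal]

-- outer loop: with d_k = r_k on every k of the range, the two dict folds are EQUAL
lemma pvOuter (seq : String) (n : Int) (lcps : List Int) :
    ∀ (ks : List Int) (reps : PySem.Dict Int Int),
    ks.Nodup → (∀ k ∈ ks, reps.contains k = false) →
    (∀ k ∈ ks,
      ((pvDups (fun i => PySem.Str.slice seq (some i) (some (i + k)))
          (PySem.List.pyRange 0 (n - k + 1)) [] : Nat) : Int)
        = (lcps.map (fun l => if k ≤ l then (1 : Int) else 0)).sum) →
    ks.foldl
      (fun (reps : PySem.Dict Int Int) k =>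
        ((PySem.List.pyRange 0 (n - k + 1)).foldl
          (fun (st : PySem.Dict Int Int × PySem.Dict String Int) i =>
            if st.2.contains (PySem.Str.slice seq (some i) (some (i + k))) then
              (st.1.insert k (st.1.getD k 0 + 1), st.2)
            else
              (st.1, st.2.insert (PySem.Str.slice seq (some i) (some (i + k))) i))
          (reps, PySem.Dict.empty)).1)
      reps
    = ks.foldl
      (fun (reps : PySem.Dict Int Int) k =>
        if (lcps.map (fun l => if k ≤ l then (1 : Int) else 0)).sum ≠ 0 then
          reps.insert k ((lcps.map (fun l => if k ≤ l then (1 : Int) else 0)).sum)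
        else reps)
      reps := by
  intro ks
  induction ks with
  | nil => intro reps _ _ _; rfl
  | cons k ks ih =>
    intro reps hnd hfresh hdr
    have hknotin : k ∉ ks := (List.nodup_cons.mp hnd).1
    simp only [List.foldl_cons]
    have hA := pvInnerA (fun i => PySem.Str.slice seq (some i) (some (i + k))) k
      (PySem.List.pyRange 0 (n - k + 1)) [] PySem.Dict.empty reps 0
      PySem.Dict.keys_empty (hfresh k (by simp))
    rw [if_pos rfl] at hA
    simp only [Nat.zero_add] at hA
    have hd := hdr k (by simp)
    set d : Nat := pvDups (fun i => PySem.Str.slice seq (some i) (some (i + k)))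
      (PySem.List.pyRange 0 (n - k + 1)) [] with hdd
    by_cases h0 : d = 0
    · rw [hA, if_pos h0, if_neg (by rw [← hd, h0]; simp)]
      exact ih reps (List.nodup_cons.mp hnd).2
        (fun k' hk' => hfresh k' (List.mem_cons_of_mem k hk'))
        (fun k' hk' => hdr k' (List.mem_cons_of_mem k hk'))
    · rw [hA, if_neg h0, if_pos (by rw [← hd]; exact_mod_cast h0), ← hd]
      apply ih _ (List.nodup_cons.mp hnd).2
      · intro k' hk'
        rw [PySem.Dict.contains_insert]
        have hne : k' ≠ k := fun h => hknotin (h ▸ hk')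
        simp [hne, hfresh k' (List.mem_cons_of_mem k hk')]
      · exact fun k' hk' => hdr k' (List.mem_cons_of_mem k hk')

-- ===== VERDICT (by name: the statement is the Claim_ definition above) =====
theorem count_internal_repeats_spec : Claim_unchanged_count_internal_repeats := by
  intro seq min_len _ hnD
  show count_internal_repeats seq min_len = count_internal_repeats_alt seq min_len
  by_cases h1 : 1 ≤ min_len
  · simp only [count_internal_repeats, count_internal_repeats_alt]
    by_cases hg : min_len > PySem.Int.floordiv (PySem.Str.len seq) 2
    · rw [if_pos hg, PySem.List.pyRange_one_eq_nil (by omega)]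
      rfl
    · rw [if_neg hg]
      exact congrArg PySem.Dict.items
        (pvOuter seq (PySem.Str.len seq) _ _ PySem.Dict.empty
          (PySem.List.nodup_pyRange_one _ _)
          (fun k _ => PySem.Dict.contains_empty k)
          (fun k hk => pvKey seq k (le_trans h1 (PySem.List.mem_pyRange_one.mp hk).1)))
  · unfold D_count_internal_repeats at hnD
    have h0 : min_len ≤ 0 := by omega
    have hlen1 : ¬ (1 ≤ PySem.Str.len seq) := fun h => hnD ⟨h0, Or.inl h⟩
    have hm1 : ¬ (min_len ≤ -1) := fun h => hnD ⟨h0, Or.inr h⟩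
    have hm : min_len = 0 := by omega
    have hlen0 : PySem.Str.len seq = (seq.toList.length : Int) := by simp [pysem]
    have hnil : seq.toList = [] := by
      rw [hlen0] at hlen1
      exact List.length_eq_zero_iff.mp (by omega)
    have hseq : seq = "" := String.toList_inj.mp (by rw [hnil]; rfl)
    subst hseq hm
    decide

theorem count_internal_repeats_changed : Claim_changed_count_internal_repeats := by
  unfold Claim_changed_count_internal_repeats; decide
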